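-- pv_equiv track=rewrite | github.com/kavanpatel18/ai-packaging-optimizer | generate_analysis.py | find_optimal_box
-- ===== SOURCE A (Python) =====
-- def find_optimal_box(product_dims, available_boxes):
--     """
--     Finds the smallest box a product can fit in, allowing for rotation.
--     """
--     p_dims = sorted(product_dims, reverse=True)
--
--     best_box = None
--     min_volume = float('inf')
--
--     for box in available_boxes:
--         b_dims = sorted(box, reverse=True)
--
--         if (p_dims[0] <= b_dims[0] and
--             p_dims[1] <= b_dims[1] and
--             p_dims[2] <= b_dims[2]):
--
--             box_volume = b_dims[0] * b_dims[1] * b_dims[2]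
--
--             if box_volume < min_volume:
--                 min_volume = box_volume
--                 best_box = box
--
--     return best_box
-- ===== SOURCE B (Python) =====
-- def find_optimal_box(product_dims, available_boxes):
--     """
--     Finds the smallest box a product can fit in, allowing for rotation.
--     """
--     p = sorted(product_dims, reverse=True)
--     for box in sorted(available_boxes, key=lambda b: b[0] * b[1] * b[2]):
--         b = sorted(box, reverse=True)
--         if p[0] <= b[0] and p[1] <= b[1] and p[2] <= b[2]:
--             return box
--     return None
-- ===== Notes on version B (the rewrite author's own statement) =====
-- stated objective: alternative
-- what changed: Replaced A's single-pass running-minimum loop (best_box/min_volume accumulator with a float('inf') sentinel) by sort-then-scan: stably sort the boxes by volume ascending once and return the first box in that order that fits; stability makes equal-volume ties resolve to the earliest-listed box, exactly A's first-strict-minimum tie-break.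
import Mathlib
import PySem

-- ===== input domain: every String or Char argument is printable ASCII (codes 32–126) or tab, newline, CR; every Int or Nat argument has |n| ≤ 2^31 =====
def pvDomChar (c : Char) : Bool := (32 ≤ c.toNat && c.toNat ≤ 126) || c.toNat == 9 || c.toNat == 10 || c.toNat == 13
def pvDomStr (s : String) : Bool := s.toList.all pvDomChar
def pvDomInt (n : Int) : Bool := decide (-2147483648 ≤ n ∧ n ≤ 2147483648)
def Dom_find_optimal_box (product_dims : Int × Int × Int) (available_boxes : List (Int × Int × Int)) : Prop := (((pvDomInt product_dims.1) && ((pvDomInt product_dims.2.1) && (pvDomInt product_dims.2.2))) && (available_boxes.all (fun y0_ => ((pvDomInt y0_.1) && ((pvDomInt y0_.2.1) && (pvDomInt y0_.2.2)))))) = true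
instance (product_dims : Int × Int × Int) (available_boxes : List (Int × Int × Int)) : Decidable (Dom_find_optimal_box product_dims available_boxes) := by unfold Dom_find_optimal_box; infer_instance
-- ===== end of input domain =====

-- B: A's single-pass running-minimum loop becomes sort-the-boxes-by-volume-ascending (stable) then return the first that fits (alternative decomposition; same result by stability).


-- ===== PORT A =====
-- the three components of a Python 3-tuple as a list (what sorted(t) iterates over)
def pvDims3 (t : Int × Int × Int) : List Int := [t.1, t.2.1, t.2.2]

-- min_volume = float('inf') is the sentinel state: Option Int with none = inf
def find_optimal_box (product_dims : Int × Int × Int) (available_boxes : List (Int × Int × Int)) : Option (Int × Int × Int) :=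
  let p_dims := PySem.List.sorted (pvDims3 product_dims) (fun x => x) true
  (available_boxes.foldl
    (fun (st : Option (Int × Int × Int) × Option Int) box =>
      let b_dims := PySem.List.sorted (pvDims3 box) (fun x => x) true
      if PySem.List.pyGetD p_dims 0 0 ≤ PySem.List.pyGetD b_dims 0 0 ∧
         PySem.List.pyGetD p_dims 1 0 ≤ PySem.List.pyGetD b_dims 1 0 ∧
         PySem.List.pyGetD p_dims 2 0 ≤ PySem.List.pyGetD b_dims 2 0 then
        let box_volume := PySem.List.pyGetD b_dims 0 0 * PySem.List.pyGetD b_dims 1 0 * PySem.List.pyGetD b_dims 2 0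
        match st.2 with
        | none => (some box, some box_volume)        -- box_volume < inf
        | some v => if box_volume < v then (some box, some box_volume) else st
      else st)
    (none, none)).1

-- ===== PORT B =====
-- the for-loop with an early return over the volume-sorted boxes is List.find?
def find_optimal_box_alt (product_dims : Int × Int × Int) (available_boxes : List (Int × Int × Int)) : Option (Int × Int × Int) :=
  let p := PySem.List.sorted (pvDims3 product_dims) (fun x => x) true
  List.find?
    (fun box =>
      let b := PySem.List.sorted (pvDims3 box) (fun x => x) true
      decide (PySem.List.pyGetD p 0 0 ≤ PySem.List.pyGetD b 0 0 ∧
              PySem.List.pyGetD p 1 0 ≤ PySem.List.pyGetD b 1 0 ∧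
              PySem.List.pyGetD p 2 0 ≤ PySem.List.pyGetD b 2 0))
    (PySem.List.sorted available_boxes (fun b => b.1 * b.2.1 * b.2.2) false)

-- ===== PRECONDITION & SPEC =====
def Spec_find_optimal_box (product_dims : Int × Int × Int) (available_boxes : List (Int × Int × Int)) (out : Option (Int × Int × Int)) : Prop := out = find_optimal_box_alt product_dims available_boxes
instance (product_dims : Int × Int × Int) (available_boxes : List (Int × Int × Int)) (out : Option (Int × Int × Int)) : Decidable (Spec_find_optimal_box product_dims available_boxes out) := by unfold Spec_find_optimal_box; infer_instance

-- ===== CLAIM (what is proved, stated in full; the proofs are below) =====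
def Claim_equal_find_optimal_box : Prop := ∀ (product_dims : Int × Int × Int) (available_boxes : List (Int × Int × Int)), Dom_find_optimal_box product_dims available_boxes → Spec_find_optimal_box product_dims available_boxes (find_optimal_box product_dims available_boxes)

-- ===== LEMMAS AND PROOFS =====

-- volume of a triple
def pvVol (b : Int × Int × Int) : Int := b.1 * b.2.1 * b.2.2

-- the shared fit predicate (both programs test it on the descending-sorted dims)
def pvFits (product_dims : Int × Int × Int) (box : Int × Int × Int) : Bool :=
  let p := PySem.List.sorted (pvDims3 product_dims) (fun x => x) true
  let b := PySem.List.sorted (pvDims3 box) (fun x => x) true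
  decide (PySem.List.pyGetD p 0 0 ≤ PySem.List.pyGetD b 0 0 ∧
          PySem.List.pyGetD p 1 0 ≤ PySem.List.pyGetD b 1 0 ∧
          PySem.List.pyGetD p 2 0 ≤ PySem.List.pyGetD b 2 0)

-- the sort of three integers is some explicit three-element list
theorem sort3_ex (a b c : Int) (r : Bool) : ∃ x y z, PySem.List.sorted [a,b,c] (fun x => x) r = [x,y,z] := by
  have h3 : (PySem.List.sorted [a,b,c] (fun x => x) r).length = 3 := by
    rw [PySem.List.length_sorted]; rfl
  rcases e : PySem.List.sorted [a,b,c] (fun x => x) r with _ | ⟨x, _ | ⟨y, _ | ⟨z, _ | _⟩⟩⟩ <;>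
    simp_all

-- the volume A computes from the descending-sorted dims is the plain product
theorem vol_desc_eq (box : Int × Int × Int) :
    PySem.List.pyGetD (PySem.List.sorted (pvDims3 box) (fun x => x) true) 0 0 *
    PySem.List.pyGetD (PySem.List.sorted (pvDims3 box) (fun x => x) true) 1 0 *
    PySem.List.pyGetD (PySem.List.sorted (pvDims3 box) (fun x => x) true) 2 0 = pvVol box := by
  obtain ⟨b1, b2, b3⟩ := box
  obtain ⟨x, y, z, e⟩ := sort3_ex b1 b2 b3 true
  have hperm : ([x, y, z] : List Int).Perm [b1, b2, b3] := by
    rw [← e]; exact PySem.List.sorted_perm ..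
  have hp := hperm.prod_eq
  simp only [List.prod_cons, List.prod_nil, mul_one] at hp
  simp only [pvVol, pvDims3, e]
  simp [PySem.List.pyGetD, PySem.List.pyGet?, PySem.List.pyIdx?]
  linear_combination hp

-- the insertion step of the stable volume sort: where the first fitting element lands
theorem find?_insertBy (pf : Int × Int × Int → Bool) (x : Int × Int × Int)
    (L : List (Int × Int × Int)) (hL : L.Pairwise (fun a b => pvVol a ≤ pvVol b)) :
    List.find? pf (PySem.List.insertBy (fun a b => decide (pvVol a < pvVol b)) x L) =
      match List.find? pf L with
      | none => if pf x then some x else none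
      | some c => if pf x && decide (pvVol x < pvVol c) then some x else some c := by
  induction L with
  | nil =>
    simp [PySem.List.insertBy, List.find?]
  | cons y t ih =>
    have hy : ∀ z ∈ t, pvVol y ≤ pvVol z := (List.pairwise_cons.mp hL).1
    have ht := (List.pairwise_cons.mp hL).2
    by_cases hlt : pvVol x < pvVol y
    · -- x is inserted in front of y
      simp only [PySem.List.insertBy, decide_eq_true_eq, if_pos hlt]
      by_cases hx : pf x = true
      · by_cases hyf : pf y = true
        · simp [List.find?, hx, hyf, hlt]
        · cases e : List.find? pf t with
          | none => simp [List.find?, hx, hyf, e]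
          | some c =>
            have hc : c ∈ t := List.mem_of_find?_eq_some e
            have : pvVol x < pvVol c := lt_of_lt_of_le hlt (hy c hc)
            simp [List.find?, hx, hyf, e, this]
      · by_cases hyf : pf y = true
        · simp [List.find?, hx, hyf]
        · cases e : List.find? pf t with
          | none => simp [List.find?, hx, hyf, e]
          | some c => simp [List.find?, hx, hyf, e]
    · -- x goes past y, into the tail
      simp only [PySem.List.insertBy, decide_eq_true_eq, if_neg hlt]
      by_cases hyf : pf y = true
      · simp [List.find?, hyf, hlt]
      · simp only [List.find?, hyf]
        exact ih ht

-- inserting preserves volume-sortedness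
theorem pairwise_insertBy (x : Int × Int × Int) (L : List (Int × Int × Int))
    (hL : L.Pairwise (fun a b => pvVol a ≤ pvVol b)) :
    (PySem.List.insertBy (fun a b => decide (pvVol a < pvVol b)) x L).Pairwise
      (fun a b => pvVol a ≤ pvVol b) := by
  induction L with
  | nil => simp [PySem.List.insertBy]
  | cons y t ih =>
    have hy : ∀ z ∈ t, pvVol y ≤ pvVol z := (List.pairwise_cons.mp hL).1
    have ht := (List.pairwise_cons.mp hL).2
    by_cases hlt : pvVol x < pvVol y
    · simp only [PySem.List.insertBy, decide_eq_true_eq, if_pos hlt]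
      refine List.pairwise_cons.mpr ⟨?_, hL⟩
      intro z hz
      rcases List.mem_cons.mp hz with hz | hz
      · subst hz; exact le_of_lt hlt
      · exact le_trans (le_of_lt hlt) (hy z hz)
    · simp only [PySem.List.insertBy, decide_eq_true_eq, if_neg hlt]
      refine List.pairwise_cons.mpr ⟨?_, ih ht⟩
      intro z hz
      rcases (PySem.List.mem_insertBy _ _ _ _).mp hz with hz | hz
      · subst hz; exact le_of_not_gt hlt
      · exact hy z hz

-- A's running-minimum fold over a prefix equals find? over the sorted-so-far accumulator
theorem loop_eq (pf : Int × Int × Int → Bool) (boxes : List (Int × Int × Int)) :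
    ∀ (S : List (Int × Int × Int)), S.Pairwise (fun a b => pvVol a ≤ pvVol b) →
      (boxes.foldl
        (fun (st : Option (Int × Int × Int) × Option Int) box =>
          if pf box then
            match st.2 with
            | none => (some box, some (pvVol box))
            | some v => if pvVol box < v then (some box, some (pvVol box)) else st
          else st)
        (List.find? pf S, (List.find? pf S).map pvVol)).1
      = List.find? pf
          (boxes.foldl (fun acc x => PySem.List.insertBy (fun a b => decide (pvVol a < pvVol b)) x acc) S) := by
  induction boxes with
  | nil => intro S _; simp
  | cons b t ih =>
    intro S hS
    have hins := find?_insertBy pf b S hS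
    have hpw := pairwise_insertBy b S hS
    have := ih (PySem.List.insertBy (fun a b => decide (pvVol a < pvVol b)) b S) hpw
    simp only [List.foldl_cons]
    rw [← this]
    congr 1
    rw [hins]
    cases e : List.find? pf S with
    | none =>
      by_cases hb : pf b = true <;> simp [hb]
    | some c =>
      by_cases hb : pf b = true
      · by_cases hv : pvVol b < pvVol c <;> simp [hb, hv]
      · simp [hb]

-- ===== VERDICT (by name: the statement is the Claim_ definition above) =====
theorem find_optimal_box_spec : Claim_equal_find_optimal_box := by
  intro p boxes _
  unfold Spec_find_optimal_box
  have halt : find_optimal_box_alt p boxes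
      = List.find? (pvFits p) (PySem.List.sorted boxes (fun b => b.1 * b.2.1 * b.2.2) false) := rfl
  rw [halt]
  unfold find_optimal_box
  show (List.foldl
      (fun (st : Option (Int × Int × Int) × Option Int) box =>
        let b_dims := PySem.List.sorted (pvDims3 box) (fun x => x) true
        if PySem.List.pyGetD (PySem.List.sorted (pvDims3 p) (fun x => x) true) 0 0 ≤ PySem.List.pyGetD b_dims 0 0 ∧
           PySem.List.pyGetD (PySem.List.sorted (pvDims3 p) (fun x => x) true) 1 0 ≤ PySem.List.pyGetD b_dims 1 0 ∧
           PySem.List.pyGetD (PySem.List.sorted (pvDims3 p) (fun x => x) true) 2 0 ≤ PySem.List.pyGetD b_dims 2 0 then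
          let box_volume := PySem.List.pyGetD b_dims 0 0 * PySem.List.pyGetD b_dims 1 0 * PySem.List.pyGetD b_dims 2 0
          match st.2 with
          | none => (some box, some box_volume)
          | some v => if box_volume < v then (some box, some box_volume) else st
        else st)
      (none, none) boxes).1
    = List.find? (pvFits p) (PySem.List.sorted boxes (fun b => b.1 * b.2.1 * b.2.2) false)
  have hstep :
      (fun (st : Option (Int × Int × Int) × Option Int) box =>
        let b_dims := PySem.List.sorted (pvDims3 box) (fun x => x) true
        if PySem.List.pyGetD (PySem.List.sorted (pvDims3 p) (fun x => x) true) 0 0 ≤ PySem.List.pyGetD b_dims 0 0 ∧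
           PySem.List.pyGetD (PySem.List.sorted (pvDims3 p) (fun x => x) true) 1 0 ≤ PySem.List.pyGetD b_dims 1 0 ∧
           PySem.List.pyGetD (PySem.List.sorted (pvDims3 p) (fun x => x) true) 2 0 ≤ PySem.List.pyGetD b_dims 2 0 then
          let box_volume := PySem.List.pyGetD b_dims 0 0 * PySem.List.pyGetD b_dims 1 0 * PySem.List.pyGetD b_dims 2 0
          match st.2 with
          | none => (some box, some box_volume)
          | some v => if box_volume < v then (some box, some box_volume) else st
        else st)
      = (fun (st : Option (Int × Int × Int) × Option Int) box =>
          if pvFits p box then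
            match st.2 with
            | none => (some box, some (pvVol box))
            | some v => if pvVol box < v then (some box, some (pvVol box)) else st
          else st) := by
    funext st box
    by_cases h : pvFits p box = true
    · have h' := (decide_eq_true_iff).mp h

      simp only [vol_desc_eq, if_pos h', h, if_pos]
    · have h' : ¬ (PySem.List.pyGetD (PySem.List.sorted (pvDims3 p) (fun x => x) true) 0 0 ≤ PySem.List.pyGetD (PySem.List.sorted (pvDims3 box) (fun x => x) true) 0 0 ∧
           PySem.List.pyGetD (PySem.List.sorted (pvDims3 p) (fun x => x) true) 1 0 ≤ PySem.List.pyGetD (PySem.List.sorted (pvDims3 box) (fun x => x) true) 1 0 ∧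
           PySem.List.pyGetD (PySem.List.sorted (pvDims3 p) (fun x => x) true) 2 0 ≤ PySem.List.pyGetD (PySem.List.sorted (pvDims3 box) (fun x => x) true) 2 0) := by
        simpa [pvFits] using h
      simp only [if_neg h', h, if_neg, Bool.false_eq_true, not_false_iff]
  rw [hstep]
  have hkey : (fun (b : Int × Int × Int) => b.1 * b.2.1 * b.2.2) = pvVol := rfl
  rw [hkey, PySem.List.sorted_eq_foldl_insertBy]
  have h0 : (List.find? (pvFits p) ([] : List (Int × Int × Int)),
      (List.find? (pvFits p) ([] : List (Int × Int × Int))).map pvVol)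
      = ((none : Option (Int × Int × Int)), (none : Option Int)) := rfl
  rw [← h0]
  exact loop_eq (pvFits p) boxes [] List.Pairwise.nil
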